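-- pv_equiv track=rewrite | github.com/NMIL230/nmil-p-mc-ai-man02 | scripts/run_full_analysis.py | extract_survey_stats
-- ===== SOURCE A (Python) =====
-- from typing import Any, Callable, Dict, Iterable, List, Optional, Tuple
--
-- def extract_survey_stats(stdout: str) -> List[str]:
--     stats: List[str] = []
--     for raw in stdout.splitlines():
--         stripped = raw.strip()
--         if stripped.startswith("Paired-sample Pearson correlation"):
--             if stats and stats[-1] != "":
--                 stats.append("")
--             stats.append(stripped)
--         elif stripped.startswith("Bayes factor BF10"):
--             stats.append(stripped)
--         elif stripped.startswith("Tests:"):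
--             stats.append(stripped)
--     return stats
-- ===== SOURCE B (Python) =====
-- def extract_survey_stats(stdout: str):
--     PEAR = "Paired-sample Pearson correlation"
--     matched = [s for s in map(str.strip, stdout.splitlines())
--                if s.startswith((PEAR, "Bayes factor BF10", "Tests:"))]
--     # group the matched lines into Pearson-delimited blocks: each block is one
--     # leading line plus the following non-Pearson lines
--     blocks = []
--     rest = matched
--     while rest:
--         j = 1
--         while j < len(rest) and not rest[j].startswith(PEAR):
--             j += 1
--         blocks.append(rest[:j])
--         rest = rest[j:]
--     # join the blocks with a blank separator line
--     if not blocks: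
--         return []
--     out = list(blocks[0])
--     for blk in blocks[1:]:
--         out.append("")
--         out.extend(blk)
--     return out
-- ===== Notes on version B (the rewrite author's own statement) =====
-- stated objective: alternative
-- what changed: Replaces A's single accumulator loop with a last-element guard by a group-and-join algorithm: filter the matching stripped lines, group them into Pearson-delimited blocks with an index scan, then join the blocks with a blank separator line.
import Mathlib
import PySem

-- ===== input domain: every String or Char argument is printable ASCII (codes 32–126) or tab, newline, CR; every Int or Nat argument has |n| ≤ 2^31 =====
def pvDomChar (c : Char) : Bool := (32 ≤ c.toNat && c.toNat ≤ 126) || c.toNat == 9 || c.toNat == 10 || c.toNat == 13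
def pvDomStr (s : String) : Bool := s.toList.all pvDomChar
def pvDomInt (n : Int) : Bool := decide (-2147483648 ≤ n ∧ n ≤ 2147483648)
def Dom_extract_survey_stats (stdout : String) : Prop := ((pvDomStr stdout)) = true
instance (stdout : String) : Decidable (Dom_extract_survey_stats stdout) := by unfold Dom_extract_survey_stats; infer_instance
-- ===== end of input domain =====

-- B replaces A's single guarded accumulator loop by a group-and-join algorithm: filter the
-- matching stripped lines, group them into Pearson-delimited blocks, join blocks with a blank
-- line; alternative structure, same cost.

-- ===== PORT A =====
def pvStepA (stats : List String) (raw : String) : List String :=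
  let stripped := PySem.Str.strip raw
  if PySem.Str.startswith stripped "Paired-sample Pearson correlation" then
    (if stats ≠ [] ∧ stats.getLast? ≠ some "" then stats ++ [""] else stats) ++ [stripped]
  else if PySem.Str.startswith stripped "Bayes factor BF10" then stats ++ [stripped]
  else if PySem.Str.startswith stripped "Tests:" then stats ++ [stripped]
  else stats

def extract_survey_stats (stdout : String) : List String :=
  (PySem.Str.splitlines stdout).foldl pvStepA []

-- ===== PORT B =====
def pvPear (s : String) : Bool :=
  PySem.Str.startswith s "Paired-sample Pearson correlation"

def pvMatches (s : String) : Bool :=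
  pvPear s || PySem.Str.startswith s "Bayes factor BF10" || PySem.Str.startswith s "Tests:"

-- the inner while loop scans the following non-Pearson lines (rest[:j] / rest[j:])
def pvBlocks : List String → List (List String)
  | [] => []
  | x :: r => (x :: r.takeWhile (fun s => !pvPear s)) :: pvBlocks (r.dropWhile (fun s => !pvPear s))
termination_by l => l.length
decreasing_by
  simpa using Nat.lt_succ_of_le (List.length_dropWhile_le (fun s => !pvPear s) r)

def pvJoin (blocks : List (List String)) : List String :=
  match blocks with
  | [] => []
  | b :: bs => bs.foldl (fun out blk => out ++ [""] ++ blk) b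

def extract_survey_stats_alt (stdout : String) : List String :=
  pvJoin (pvBlocks (((PySem.Str.splitlines stdout).map PySem.Str.strip).filter pvMatches))

-- ===== PRECONDITION & SPEC =====
def Spec_extract_survey_stats (stdout : String) (out : List String) : Prop := out = extract_survey_stats_alt stdout
instance (stdout : String) (out : List String) : Decidable (Spec_extract_survey_stats stdout out) := by unfold Spec_extract_survey_stats; infer_instance

-- ===== CLAIM (what is proved, stated in full; the proofs are below) =====
def Claim_equal_extract_survey_stats : Prop := ∀ (stdout : String), Dom_extract_survey_stats stdout → Spec_extract_survey_stats stdout (extract_survey_stats stdout)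

-- ===== LEMMAS AND PROOFS =====

-- proof-only intermediate: A's step restricted to an already-matching stripped line
def pvStepB (out : List String) (s : String) : List String :=
  (if pvPear s && !out.isEmpty then out ++ [""] else out) ++ [s]

theorem pv_step_core (acc : List String) (s : String) (p b t : Bool)
    (hinv : acc = [] ∨ acc.getLast? ≠ some "")
    (hm : (p || b || t) = true) :
    (if p then (if acc ≠ [] ∧ acc.getLast? ≠ some "" then acc ++ [""] else acc) ++ [s]
     else if b then acc ++ [s] else if t then acc ++ [s] else acc)
    = (if p && !acc.isEmpty then acc ++ [""] else acc) ++ [s] := by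
  cases p
  · cases b
    · cases t
      · simp at hm
      · simp
    · simp
  · rcases hinv with h0 | hl
    · subst h0; simp
    · by_cases hn : acc = []
      · subst hn; simp
      · have : acc.isEmpty = false := by simpa using hn
        simp [this, hn, hl]

theorem pv_step_match (acc : List String) (raw : String)
    (hinv : acc = [] ∨ acc.getLast? ≠ some "")
    (hm : pvMatches (PySem.Str.strip raw) = true) :
    pvStepA acc raw = pvStepB acc (PySem.Str.strip raw) := by
  unfold pvMatches pvPear at hm
  unfold pvStepA pvStepB pvPear
  exact pv_step_core acc (PySem.Str.strip raw) _ _ _ hinv hm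

theorem pv_step_skip (acc : List String) (raw : String)
    (hm : pvMatches (PySem.Str.strip raw) = false) :
    pvStepA acc raw = acc := by
  unfold pvMatches pvPear at hm
  unfold pvStepA
  rw [Bool.or_eq_false_iff, Bool.or_eq_false_iff] at hm
  rw [if_neg, if_neg, if_neg]
  · simpa using hm.2
  · simpa using hm.1.2
  · simpa using hm.1.1

theorem pv_step_last (acc : List String) (raw : String)
    (hne : PySem.Str.strip raw ≠ "") :
    (pvStepB acc (PySem.Str.strip raw)).getLast? ≠ some "" := by
  unfold pvStepB
  simp [hne]

-- a matching line is never empty (all three prefixes are nonempty)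
theorem pvMatches_ne_empty {s : String} (h : pvMatches s = true) : s ≠ "" := by
  intro he; subst he; revert h; decide

-- A's fold equals the guarded fold over the filtered stripped lines
theorem pv_stageA (lines : List String) :
    ∀ acc : List String, (acc = [] ∨ acc.getLast? ≠ some "") →
      lines.foldl pvStepA acc
        = ((lines.map PySem.Str.strip).filter pvMatches).foldl pvStepB acc := by
  induction lines with
  | nil => intro acc _; simp
  | cons raw rest ih =>
    intro acc hinv
    by_cases hm : pvMatches (PySem.Str.strip raw) = true
    · have hstep := pv_step_match acc raw hinv hm
      have hinv' : pvStepB acc (PySem.Str.strip raw) = [] ∨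
          (pvStepB acc (PySem.Str.strip raw)).getLast? ≠ some "" :=
        Or.inr (pv_step_last acc raw (pvMatches_ne_empty hm))
      simp only [List.foldl_cons, List.map_cons, List.filter_cons, hm, if_pos]
      rw [hstep]
      exact ih _ hinv'
    · have hstep := pv_step_skip acc raw (by simpa using hm)
      simp only [List.foldl_cons, List.map_cons, List.filter_cons, hm]
      rw [hstep]
      simp only [Bool.false_eq_true, if_false]
      exact ih acc hinv

-- the join fold written as flatMap
theorem pv_join_flatMap (bs : List (List String)) :
    ∀ b0 : List String,
      bs.foldl (fun out blk => out ++ [""] ++ blk) b0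
        = b0 ++ bs.flatMap (fun b => "" :: b) := by
  induction bs with
  | nil => intro b0; simp
  | cons b bs ih =>
    intro b0
    rw [List.foldl_cons, ih, List.flatMap_cons]
    simp [List.append_assoc]

-- folding pvStepB over non-Pearson lines just appends them
theorem pv_run_nonpear (t : List String) :
    ∀ acc : List String, (∀ s ∈ t, pvPear s = false) →
      t.foldl pvStepB acc = acc ++ t := by
  induction t with
  | nil => intro acc _; simp
  | cons s t ih =>
    intro acc h
    have hs : pvPear s = false := h s (by simp)
    simp only [List.foldl_cons, pvStepB, hs]
    rw [ih _ (fun x hx => h x (by simp [hx]))]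
    simp

-- folding a non-Pearson run then the remainder
theorem pv_run_then (t d : List String) (acc : List String)
    (h : ∀ s ∈ t, pvPear s = false) :
    (t ++ d).foldl pvStepB acc = d.foldl pvStepB (acc ++ t) := by
  rw [List.foldl_append, pv_run_nonpear t acc h]

-- head of dropWhile fails the predicate
theorem pv_head_dropWhile (p : String → Bool) :
    ∀ (l : List String) (x : String) (r : List String),
      l.dropWhile p = x :: r → p x = false := by
  intro l
  induction l with
  | nil => intro x r h; simp [List.dropWhile] at h
  | cons a l ih =>
    intro x r h
    by_cases ha : p a = true
    · rw [List.dropWhile_cons_of_pos ha] at h; exact ih x r h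
    · rw [List.dropWhile_cons_of_neg ha] at h
      cases h; simpa using ha

-- main B-side lemma: with a nonempty accumulator and a Pearson head,
-- the guarded fold is the accumulator followed by "" :: block for each block
theorem pv_stageB_pear (L : List String) :
    (∀ x r, L = x :: r → pvPear x = true) →
    ∀ acc : List String, acc ≠ [] →
      L.foldl pvStepB acc = acc ++ (pvBlocks L).flatMap (fun b => "" :: b) := by
  induction L using pvBlocks.induct with
  | case1 => intro _ acc _; simp [pvBlocks]
  | case2 x r ih =>
    intro hhead acc hacc
    have hx : pvPear x = true := hhead x r rfl
    have hne : acc.isEmpty = false := by simpa using hacc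
    have hsplit : r.takeWhile (fun s => !pvPear s) ++ r.dropWhile (fun s => !pvPear s) = r :=
      List.takeWhile_append_dropWhile
    have step1 : pvStepB acc x = acc ++ ["", x] := by
      simp [pvStepB, hx, hne]
    calc (x :: r).foldl pvStepB acc
        = r.foldl pvStepB (acc ++ ["", x]) := by rw [List.foldl_cons, step1]
      _ = (r.takeWhile (fun s => !pvPear s) ++ r.dropWhile (fun s => !pvPear s)).foldl
            pvStepB (acc ++ ["", x]) := by rw [hsplit]
      _ = (r.dropWhile (fun s => !pvPear s)).foldl pvStepB
            ((acc ++ ["", x]) ++ r.takeWhile (fun s => !pvPear s)) := by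
            exact pv_run_then _ _ _ (fun s hs => by
              have := List.mem_takeWhile_imp hs; simpa using this)
      _ = ((acc ++ ["", x]) ++ r.takeWhile (fun s => !pvPear s))
            ++ (pvBlocks (r.dropWhile (fun s => !pvPear s))).flatMap (fun b => "" :: b) := by
            refine ih (fun y s hy => ?_) _ (by simp)
            have := pv_head_dropWhile (fun s => !pvPear s) r y s hy
            simpa using this
      _ = acc ++ (pvBlocks (x :: r)).flatMap (fun b => "" :: b) := by
            rw [pvBlocks]
            simp [List.append_assoc]

-- the guarded fold from the empty accumulator is the block join
theorem pv_stageB (L : List String) :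
    L.foldl pvStepB [] = pvJoin (pvBlocks L) := by
  cases L with
  | nil => simp [pvBlocks, pvJoin]
  | cons x r =>
    have step1 : pvStepB [] x = [x] := by simp [pvStepB]
    have hsplit : r.takeWhile (fun s => !pvPear s) ++ r.dropWhile (fun s => !pvPear s) = r :=
      List.takeWhile_append_dropWhile
    calc (x :: r).foldl pvStepB []
        = r.foldl pvStepB [x] := by rw [List.foldl_cons, step1]
      _ = (r.takeWhile (fun s => !pvPear s) ++ r.dropWhile (fun s => !pvPear s)).foldl
            pvStepB [x] := by rw [hsplit]
      _ = (r.dropWhile (fun s => !pvPear s)).foldl pvStepB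
            ([x] ++ r.takeWhile (fun s => !pvPear s)) := by
            exact pv_run_then _ _ _ (fun s hs => by
              have := List.mem_takeWhile_imp hs; simpa using this)
      _ = ([x] ++ r.takeWhile (fun s => !pvPear s))
            ++ (pvBlocks (r.dropWhile (fun s => !pvPear s))).flatMap (fun b => "" :: b) := by
            refine pv_stageB_pear _ (fun y s hy => ?_) _ (by simp)
            have := pv_head_dropWhile (fun s => !pvPear s) r y s hy
            simpa using this
      _ = pvJoin (pvBlocks (x :: r)) := by
            rw [pvBlocks, pvJoin, pv_join_flatMap]
            simp

-- ===== VERDICT (by name: the statement is the Claim_ definition above) =====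
theorem extract_survey_stats_spec : Claim_equal_extract_survey_stats := by
  intro stdout _
  unfold Spec_extract_survey_stats extract_survey_stats extract_survey_stats_alt
  rw [pv_stageA _ [] (Or.inl rfl), pv_stageB]
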